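-- pv_equiv track=rewrite | github.com/Larry7939/Algorithm | DFS/사과빨리먹기.py | dfs
-- ===== SOURCE A (Python) =====
-- BOARD_SIZE = 5
--
-- dx = [0, 0, -1, 1]
--
-- dy = [-1, 1, 0, 0]
--
-- def dfs(graph, x, y, answer, count, apple):
--     # 사과가 3개면 answer.append(count)로 이동횟수 append
--     if apple == 3:
--         answer.append(count)
--     # 반복문으로 dfs호출
--     for i in range(4):
--         # nx,ny에 현재 좌표 x,y를 더한 값 dx,dy만들기
--         nx = x+dx[i]
--         ny = y+dy[i]
--
--         # 인덱스 검사(dx<0 or dx>BOARD_SIZE-1 or dy<0 or dy>BOARD_SIZE-1)를 충족하지 못하면 continue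
--         if nx < 0 or nx > BOARD_SIZE-1 or ny < 0 or ny > BOARD_SIZE-1:
--             continue
--         if graph[ny][nx] == -1:  # 해당 좌표가 -1 이라면 막혔으니 pass
--             continue
--         if graph[ny][nx] == 1:  # 1이라면 status를 True로 정해주고 apple의 수를 증가시킨다.
--             status = True
--             apple += 1
--         else:
--             status = False  # 0일 경우에는 status를 False로 한다.
--         # dfs에서 빠져 나왔을 경우 road[x][y]의 값을 복귀시켜야 하기 때문에 변수에 저장시켜 놓는다.
--         current = graph[y][x]
--         graph[y][x] = -1
--         dfs(graph, nx, ny, answer, count+1, apple)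
--         graph[y][x] = current  # 빠져나왔을 경우 좌표 값 원복
--         if status == True:  # 만약 사과를 하나 챙겼다면 원복
--             apple -= 1
--     return answer
-- ===== SOURCE B (Python) =====
-- # B: pure DFS — builds the list of move counts with a persistent `blocked` path-set
-- # instead of A's mutate-and-undo on graph; extends `answer` once at the end.
-- # (Return-value equivalence: A temporarily mutates graph but always restores it;
-- # both A and B append the collected counts to `answer` in place.)
-- BOARD_SIZE = 5
--
-- dx = [0, 0, -1, 1]
--
-- dy = [-1, 1, 0, 0]
--
-- def _collect(graph, x, y, count, apple, blocked):
--     out = [count] if apple == 3 else []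
--     for i in range(4):
--         nx = x + dx[i]
--         ny = y + dy[i]
--         if not (0 <= nx < BOARD_SIZE and 0 <= ny < BOARD_SIZE):
--             continue
--         if (nx, ny) in blocked or graph[ny][nx] == -1:
--             continue
--         out += _collect(graph, nx, ny, count + 1,
--                         apple + (1 if graph[ny][nx] == 1 else 0),
--                         blocked | {(x, y)})
--     return out
--
-- def dfs(graph, x, y, answer, count, apple):
--     answer.extend(_collect(graph, x, y, count, apple, frozenset()))
--     return answer
-- ===== Notes on version B (the rewrite author's own statement) =====
-- stated objective: alternative
-- what changed: A enumerates paths by mutating the grid in place (mark -1, recurse, undo) and threading a shared mutable answer/apple; B is a pure collector that carries a persistent blocked path-set and returns the list of counts, which is appended to answer once.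
-- outside the precondition, e.g. on dfs([[0, -1], [-1, 5]], 0, 0, [], 0, 3): A returns [0], B returns [0]
import Mathlib
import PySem

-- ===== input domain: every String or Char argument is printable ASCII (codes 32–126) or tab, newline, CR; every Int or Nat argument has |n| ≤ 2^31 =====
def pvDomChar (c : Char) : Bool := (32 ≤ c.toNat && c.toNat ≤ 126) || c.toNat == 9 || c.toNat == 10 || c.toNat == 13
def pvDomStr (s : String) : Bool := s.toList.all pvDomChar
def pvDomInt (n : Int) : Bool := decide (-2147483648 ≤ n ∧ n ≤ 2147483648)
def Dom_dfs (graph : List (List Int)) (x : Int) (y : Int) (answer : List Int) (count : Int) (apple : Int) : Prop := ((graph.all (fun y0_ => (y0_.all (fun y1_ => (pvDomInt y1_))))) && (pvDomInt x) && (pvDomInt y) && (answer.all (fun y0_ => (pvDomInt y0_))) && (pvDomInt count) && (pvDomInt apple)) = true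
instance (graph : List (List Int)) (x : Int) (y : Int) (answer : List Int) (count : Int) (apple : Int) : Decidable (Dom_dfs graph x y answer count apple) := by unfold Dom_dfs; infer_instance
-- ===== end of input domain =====

-- B replaces A's mark-(-1)/recurse/undo mutation of the grid by a pure collector carrying a
-- persistent blocked path-set; return-value equivalence (A also mutates `answer`/`graph` in
-- place, but restores `graph` and B extends `answer` identically).


-- ===== PORT A =====
-- dx/dy of the module, zipped: [(dx[i], dy[i]) for i in range(4)]
def pvDirs : List (Int × Int) := [(0, -1), (0, 1), (-1, 0), (1, 0)]

-- graph[y][x] = v  (exact for the nonnegative in-range indices A uses inside Pre_)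
def pvSetCell (g : List (List Int)) (y x : Int) (v : Int) : List (List Int) :=
  PySem.List.pySetD g y (PySem.List.pySetD (PySem.List.pyGetD g y []) x v)

-- one iteration of A's `for i in range(4)` loop; `none` = an exception was raised
def stepA (rec : List (List Int) → Int → Int → List Int → Int → Int → Option (List (List Int) × List Int))
    (x y count apple : Int) (st : Option (List (List Int) × List Int)) (d : Int × Int) :
    Option (List (List Int) × List Int) :=
  match st with
  | none => none
  | some (g, ans) =>
    let nx := x + d.1
    let ny := y + d.2
    if nx < 0 ∨ nx > 4 ∨ ny < 0 ∨ ny > 4 then some (g, ans) else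
    match PySem.List.pyGet? g ny with
    | none => none
    | some row =>
      match PySem.List.pyGet? row nx with
      | none => none
      | some v =>
        if v = -1 then some (g, ans) else
        let apple' := if v = 1 then apple + 1 else apple
        match PySem.List.pyGet? g y with
        | none => none
        | some rowy =>
          match PySem.List.pyGet? rowy x with
          | none => none
          | some current =>
            match rec (pvSetCell g y x (-1)) nx ny ans (count + 1) apple' with
            | none => none
            | some (g2, ans2) => some (pvSetCell g2 y x current, ans2)

-- A's recursion, threading the mutated grid and answer; fuel only makes it total
-- (inside Pre_ the recursion depth is at most 26 < 100, so fuel is never exhausted)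
def dfsA : Nat → List (List Int) → Int → Int → List Int → Int → Int → Option (List (List Int) × List Int)
  | 0, _, _, _, _, _, _ => none
  | fuel + 1, graph, x, y, answer, count, apple =>
    pvDirs.foldl (stepA (dfsA fuel) x y count apple)
      (some (graph, if apple = 3 then answer ++ [count] else answer))

def dfs (graph : List (List Int)) (x : Int) (y : Int) (answer : List Int) (count : Int) (apple : Int) : List Int :=
  match dfsA 100 graph x y answer count apple with
  | some (_, ans) => ans
  | none => answer

-- ===== PORT B =====
-- one iteration of _collect's loop in Source B
def stepB (rec : Int → Int → Int → Int → PySem.Set (Int × Int) → Option (List Int))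
    (g : List (List Int)) (x y count apple : Int) (blocked : PySem.Set (Int × Int))
    (st : Option (List Int)) (d : Int × Int) : Option (List Int) :=
  match st with
  | none => none
  | some out =>
    let nx := x + d.1
    let ny := y + d.2
    if ¬ (0 ≤ nx ∧ nx < 5 ∧ 0 ≤ ny ∧ ny < 5) then some out else
    if PySem.Set.contains blocked (nx, ny) then some out else
    match PySem.List.pyGet? g ny with
    | none => none
    | some row =>
      match PySem.List.pyGet? row nx with
      | none => none
      | some v =>
        if v = -1 then some out else
        match rec nx ny (count + 1) (apple + if v = 1 then 1 else 0) (PySem.Set.add blocked (x, y)) with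
        | none => none
        | some l => some (out ++ l)

-- _collect of Source B (pure: graph is never written); same fuel discipline as dfsA
def collectB (g : List (List Int)) : Nat → Int → Int → Int → Int → PySem.Set (Int × Int) → Option (List Int)
  | 0, _, _, _, _, _ => none
  | fuel + 1, x, y, count, apple, blocked =>
    pvDirs.foldl (stepB (collectB g fuel) g x y count apple blocked)
      (some (if apple = 3 then [count] else []))

def dfs_alt (graph : List (List Int)) (x : Int) (y : Int) (answer : List Int) (count : Int) (apple : Int) : List Int :=
  answer ++ (collectB graph 100 x y count apple PySem.Set.empty).getD []

-- ===== PRECONDITION & SPEC =====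
-- Pre_ admits (a) the intended inputs — a grid covering the 5×5 board with a start on the board —
-- and (b) starts so far outside the board that no neighbour is ever visited (A returns `answer`
-- untouched there for any grid).  It excludes the remaining inputs, on which A either raises
-- IndexError (a grid smaller than the 5×5 board it hard-codes, reached by the walk) or reads and
-- writes graph[y][x] with a start coordinate of -1 through Python negative-index wraparound — an
-- accident of A's bounds check that tests only the neighbour, not the current cell.
def Pre_dfs (graph : List (List Int)) (x : Int) (y : Int) (answer : List Int) (count : Int) (apple : Int) : Prop :=
  (5 ≤ graph.length ∧ (∀ i : Nat, i < 5 → 5 ≤ (graph.getD i []).length) ∧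
    0 ≤ x ∧ x ≤ 4 ∧ 0 ≤ y ∧ y ≤ 4)
  ∨ (¬ (0 ≤ x ∧ x ≤ 4 ∧ -1 ≤ y ∧ y ≤ 5) ∧ ¬ (0 ≤ y ∧ y ≤ 4 ∧ -1 ≤ x ∧ x ≤ 5))
instance (graph : List (List Int)) (x : Int) (y : Int) (answer : List Int) (count : Int) (apple : Int) : Decidable (Pre_dfs graph x y answer count apple) := by unfold Pre_dfs; infer_instance

def pvWitness_dfs : List (List Int) × Int × Int × List Int × Int × Int :=
  ([[0, 1, 0, 0, 0], [0, 0, 1, 0, 0], [0, 0, 0, 0, 0], [0, 0, 0, 1, 0], [0, 0, 0, 0, 0]], 2, 2, [], 0, 0)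

def Spec_dfs (graph : List (List Int)) (x : Int) (y : Int) (answer : List Int) (count : Int) (apple : Int) (out : List Int) : Prop := out = dfs_alt graph x y answer count apple
instance (graph : List (List Int)) (x : Int) (y : Int) (answer : List Int) (count : Int) (apple : Int) (out : List Int) : Decidable (Spec_dfs graph x y answer count apple out) := by unfold Spec_dfs; infer_instance

-- ===== CLAIM (what is proved, stated in full; the proofs are below) =====
def Claim_equal_dfs : Prop := ∀ (graph : List (List Int)) (x : Int) (y : Int) (answer : List Int) (count : Int) (apple : Int), Dom_dfs graph x y answer count apple → Pre_dfs graph x y answer count apple → Spec_dfs graph x y answer count apple (dfs graph x y answer count apple)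

-- ===== LEMMAS AND PROOFS =====

-- the grid A sees after marking the cells of `b`: g with every cell (x,y) ∈ b set to -1
def pvBlock (b : List (Int × Int)) (g : List (List Int)) : List (List Int) :=
  g.mapIdx (fun i row => row.mapIdx (fun j v => if ((j : Int), (i : Int)) ∈ b then -1 else v))

def pvGrid (g : List (List Int)) : Prop :=
  5 ≤ g.length ∧ ∀ i : Nat, i < 5 → 5 ≤ (g.getD i []).length

def pvInB (x y : Int) : Prop := 0 ≤ x ∧ x ≤ 4 ∧ 0 ≤ y ∧ y ≤ 4

theorem pvBlock_nil (g : List (List Int)) : pvBlock [] g = g := by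
  simp only [pvBlock]
  apply List.ext_getElem (by simp)
  intro i h1 h2
  simp only [List.getElem_mapIdx, List.not_mem_nil, if_neg (fun h => h)]
  apply List.ext_getElem (by simp)
  intro j hj1 hj2
  simp [List.getElem_mapIdx]

theorem pvBlock_congr (g : List (List Int)) (b1 b2 : List (Int × Int))
    (h : ∀ p, p ∈ b1 ↔ p ∈ b2) : pvBlock b1 g = pvBlock b2 g := by
  simp only [pvBlock]
  apply List.ext_getElem (by simp)
  intro i h1 h2
  simp only [List.getElem_mapIdx]
  apply List.ext_getElem (by simp)
  intro j hj1 hj2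
  simp only [List.getElem_mapIdx, h]

theorem pvBlock_length (b : List (Int × Int)) (g : List (List Int)) :
    (pvBlock b g).length = g.length := by
  simp [pvBlock]

theorem pvBlock_row_length (b : List (Int × Int)) (g : List (List Int)) (i : Nat) (h : i < g.length) :
    ((pvBlock b g)[i]'(by rw [pvBlock_length]; exact h)).length = (g[i]).length := by
  simp [pvBlock]

theorem pvBlock_getElem (b : List (Int × Int)) (g : List (List Int)) (i j : Nat)
    (hi : i < g.length) (hj : j < (g[i]).length) :
    ((pvBlock b g)[i]'(by rw [pvBlock_length]; exact hi))[j]'(by rw [pvBlock_row_length _ _ _ hi]; exact hj)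
      = if ((j : Int), (i : Int)) ∈ b then -1 else g[i][j] := by
  simp [pvBlock]

theorem pvBlock_read (b : List (Int × Int)) (g : List (List Int)) (i j : Int)
    (h0i : 0 ≤ i) (hi : i.toNat < g.length) (h0j : 0 ≤ j) (hj : j.toNat < (g[i.toNat]).length) :
    PySem.List.pyGet? (pvBlock b g) i = some ((pvBlock b g)[i.toNat]'(by rw [pvBlock_length]; exact hi)) ∧
    PySem.List.pyGet? ((pvBlock b g)[i.toNat]'(by rw [pvBlock_length]; exact hi)) j
      = some (if (j, i) ∈ b then -1 else g[i.toNat][j.toNat]) := by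
  constructor
  · exact PySem.List.pyGet?_eq_some_getElem _ h0i (by rw [pvBlock_length]; omega)
  · rw [PySem.List.pyGet?_eq_some_getElem _ h0j (by rw [pvBlock_row_length _ _ _ hi]; omega)]
    rw [pvBlock_getElem b g i.toNat j.toNat hi hj]
    simp only [Int.toNat_of_nonneg h0j, Int.toNat_of_nonneg h0i]

theorem pvBlock_mark (b : List (Int × Int)) (g : List (List Int)) (x y : Int)
    (h0x : 0 ≤ x) (h0y : 0 ≤ y) (hy : y.toNat < g.length) :
    pvSetCell (pvBlock b g) y x (-1) = pvBlock ((x, y) :: b) g := by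
  unfold pvSetCell
  rw [PySem.List.pySetD_of_nonneg _ _ h0y, PySem.List.pySetD_of_nonneg _ _ h0x,
    PySem.List.pyGetD_eq_getElem _ _ h0y (by rw [pvBlock_length]; omega)]
  apply List.ext_getElem (by simp [pvBlock])
  intro i hi1 hi2
  rw [List.getElem_set]
  have hig : i < g.length := by rw [pvBlock_length] at hi2; exact hi2
  by_cases hiy : y.toNat = i
  · subst hiy
    rw [if_pos rfl]
    apply List.ext_getElem (by rw [List.length_set, pvBlock_row_length _ _ _ hig, pvBlock_row_length _ _ _ hig])
    intro j hj1 hj2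
    have hjg : j < (g[y.toNat]).length := by
      rw [pvBlock_row_length _ _ _ hig] at hj2; exact hj2
    rw [List.getElem_set, pvBlock_getElem ((x,y)::b) g y.toNat j hig hjg]
    by_cases hjx : x.toNat = j
    · subst hjx
      rw [if_pos rfl, if_pos]
      simp [Int.toNat_of_nonneg h0x, Int.toNat_of_nonneg h0y]
    · rw [if_neg hjx, pvBlock_getElem b g y.toNat j hig hjg]
      have : ¬ ((j : Int), (y.toNat : Int)) = (x, y) := by
        intro h
        apply hjx
        have := congrArg Prod.fst h
        simp at this
        omega
      simp only [List.mem_cons, this, false_or]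
  · rw [if_neg hiy]
    apply List.ext_getElem (by rw [pvBlock_row_length _ _ _ hig, pvBlock_row_length _ _ _ hig])
    intro j hj1 hj2
    have hjg : j < (g[i]).length := by rw [pvBlock_row_length _ _ _ hig] at hj1; exact hj1
    rw [pvBlock_getElem b g i j hig hjg, pvBlock_getElem ((x,y)::b) g i j hig hjg]
    have : ¬ ((j : Int), (i : Int)) = (x, y) := by
      intro h
      apply hiy
      have := congrArg Prod.snd h
      simp at this
      omega
    simp only [List.mem_cons, this, false_or]

theorem pvBlock_restore (b : List (Int × Int)) (g : List (List Int)) (x y : Int)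
    (h0x : 0 ≤ x) (h0y : 0 ≤ y) (hy : y.toNat < g.length) (hx : x.toNat < (g[y.toNat]).length) :
    pvSetCell (pvBlock ((x, y) :: b) g) y x (if (x, y) ∈ b then -1 else g[y.toNat][x.toNat]) = pvBlock b g := by
  unfold pvSetCell
  rw [PySem.List.pySetD_of_nonneg _ _ h0y, PySem.List.pySetD_of_nonneg _ _ h0x,
    PySem.List.pyGetD_eq_getElem _ _ h0y (by rw [pvBlock_length]; omega)]
  apply List.ext_getElem (by simp [pvBlock])
  intro i hi1 hi2
  rw [List.getElem_set]
  have hig : i < g.length := by rw [pvBlock_length] at hi2; exact hi2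
  by_cases hiy : y.toNat = i
  · subst hiy
    rw [if_pos rfl]
    apply List.ext_getElem (by rw [List.length_set, pvBlock_row_length _ _ _ hig, pvBlock_row_length _ _ _ hig])
    intro j hj1 hj2
    have hjg : j < (g[y.toNat]).length := by
      rw [pvBlock_row_length _ _ _ hig] at hj2; exact hj2
    rw [List.getElem_set, pvBlock_getElem b g y.toNat j hig hjg]
    by_cases hjx : x.toNat = j
    · subst hjx
      rw [if_pos rfl]
      simp only [Int.toNat_of_nonneg h0x, Int.toNat_of_nonneg h0y]
    · rw [if_neg hjx, pvBlock_getElem ((x,y)::b) g y.toNat j hig hjg]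
      have : ¬ ((j : Int), (y.toNat : Int)) = (x, y) := by
        intro h
        apply hjx
        have := congrArg Prod.fst h
        simp at this
        omega
      simp only [List.mem_cons, this, false_or]
  · rw [if_neg hiy]
    apply List.ext_getElem (by rw [pvBlock_row_length _ _ _ hig, pvBlock_row_length _ _ _ hig])
    intro j hj1 hj2
    have hjg : j < (g[i]).length := by rw [pvBlock_row_length _ _ _ hig] at hj1; exact hj1
    rw [pvBlock_getElem ((x,y)::b) g i j hig hjg, pvBlock_getElem b g i j hig hjg]
    have : ¬ ((j : Int), (i : Int)) = (x, y) := by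
      intro h
      apply hiy
      have := congrArg Prod.snd h
      simp at this
      omega
    simp only [List.mem_cons, this, false_or]

theorem foldlA_none (rec) (x y count apple : Int) (ds : List (Int × Int)) :
    ds.foldl (stepA rec x y count apple) none = none := by
  induction ds with
  | nil => rfl
  | cons d ds ih => simpa [stepA] using ih

theorem foldlB_none (rec) (g : List (List Int)) (x y count apple : Int)
    (blocked : PySem.Set (Int × Int)) (ds : List (Int × Int)) :
    ds.foldl (stepB rec g x y count apple blocked) none = none := by
  induction ds with
  | nil => rfl
  | cons d ds ih => simpa [stepB] using ih

theorem stepA_skip (rec) (x y count apple : Int) (s : List (List Int) × List Int) (d : Int × Int)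
    (h : x + d.1 < 0 ∨ x + d.1 > 4 ∨ y + d.2 < 0 ∨ y + d.2 > 4) :
    stepA rec x y count apple (some s) d = some s := by
  simp only [stepA]
  rw [if_pos h]

theorem stepB_skip (rec) (g : List (List Int)) (x y count apple : Int)
    (blocked : PySem.Set (Int × Int)) (out : List Int) (d : Int × Int)
    (h : ¬ (0 ≤ x + d.1 ∧ x + d.1 < 5 ∧ 0 ≤ y + d.2 ∧ y + d.2 < 5)) :
    stepB rec g x y count apple blocked (some out) d = some out := by
  simp only [stepB]
  rw [if_pos h]

theorem foldlA_skip (rec) (x y count apple : Int) (s : List (List Int) × List Int)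
    (ds : List (Int × Int))
    (h : ∀ d ∈ ds, x + d.1 < 0 ∨ x + d.1 > 4 ∨ y + d.2 < 0 ∨ y + d.2 > 4) :
    ds.foldl (stepA rec x y count apple) (some s) = some s := by
  induction ds with
  | nil => rfl
  | cons d ds ih =>
    rw [List.foldl_cons, stepA_skip _ _ _ _ _ _ _ (h d (by simp))]
    exact ih (fun d hd => h d (by simp [hd]))

theorem foldlB_skip (rec) (g : List (List Int)) (x y count apple : Int)
    (blocked : PySem.Set (Int × Int)) (out : List Int) (ds : List (Int × Int))
    (h : ∀ d ∈ ds, x + d.1 < 0 ∨ x + d.1 > 4 ∨ y + d.2 < 0 ∨ y + d.2 > 4) :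
    ds.foldl (stepB rec g x y count apple blocked) (some out) = some out := by
  induction ds with
  | nil => rfl
  | cons d ds ih =>
    rw [List.foldl_cons, stepB_skip _ _ _ _ _ _ _ _ _ (by have := h d (by simp); omega)]
    exact ih (fun d hd => h d (by simp [hd]))

theorem simLoop (g : List (List Int)) (fuel : Nat)
    (IH : ∀ (b : List (Int × Int)) (x y : Int) (ans : List Int) (count apple : Int),
      pvInB x y →
      dfsA fuel (pvBlock b g) x y ans count apple
        = (collectB g fuel x y count apple b).map (fun l => (pvBlock b g, ans ++ l)))
    (hg : pvGrid g) :
    ∀ (ds : List (Int × Int)) (b : List (Int × Int)) (x y count apple : Int) (ans out : List Int),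
    pvInB x y →
    ds.foldl (stepA (dfsA fuel) x y count apple) (some (pvBlock b g, ans ++ out))
      = (ds.foldl (stepB (collectB g fuel) g x y count apple b) (some out)).map
          (fun l => (pvBlock b g, ans ++ l)) := by
  intro ds
  induction ds with
  | nil => intro b x y count apple ans out hin; rfl
  | cons d ds ihds =>
    intro b x y count apple ans out hin
    rw [List.foldl_cons, List.foldl_cons]
    by_cases hb : 0 ≤ x + d.1 ∧ x + d.1 ≤ 4 ∧ 0 ≤ y + d.2 ∧ y + d.2 ≤ 4
    case neg =>
      rw [stepA_skip _ _ _ _ _ _ _ (by omega), stepB_skip _ _ _ _ _ _ _ _ _ (by omega)]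
      exact ihds b x y count apple ans out hin
    case pos =>
      obtain ⟨h1, h2, h3, h4⟩ := hb
      obtain ⟨hx0, hx4, hy0, hy4⟩ := hin
      have hyg : (y + d.2).toNat < g.length := by have := hg.1; omega
      have hxg : (x + d.1).toNat < (g[(y+d.2).toNat]).length := by
        have h5 := hg.2 (y+d.2).toNat (by omega)
        rw [List.getD_eq_getElem _ _ hyg] at h5; omega
      have hyg' : y.toNat < g.length := by have := hg.1; omega
      have hxg' : x.toNat < (g[y.toNat]).length := by
        have h5 := hg.2 y.toNat (by omega)
        rw [List.getD_eq_getElem _ _ hyg'] at h5; omega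
      obtain ⟨hra1, hra2⟩ := pvBlock_read b g (y+d.2) (x+d.1) (by omega) hyg (by omega) hxg
      obtain ⟨hrc1, hrc2⟩ := pvBlock_read b g y x hy0 hyg' hx0 hxg'
      simp only [stepA, stepB]
      rw [if_neg (by omega), if_neg (by omega), hra1]
      dsimp only
      rw [hra2]
      dsimp only
      by_cases hmem : (x + d.1, y + d.2) ∈ b
      case pos =>
        have hc : PySem.Set.contains b (x + d.1, y + d.2) = true := by
          simpa [PySem.Set.contains] using hmem
        rw [if_pos hmem, if_pos rfl, if_pos hc]
        exact ihds b x y count apple ans out ⟨hx0, hx4, hy0, hy4⟩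
      case neg =>
        have hc : ¬ PySem.Set.contains b (x + d.1, y + d.2) = true := by
          simp [PySem.Set.contains, hmem]
        rw [if_neg hmem, if_neg hc,
          PySem.List.pyGet?_eq_some_getElem g (i := y + d.2) (by omega) (by omega)]
        dsimp only
        rw [PySem.List.pyGet?_eq_some_getElem (g[(y+d.2).toNat]'hyg) (i := x + d.1) (by omega) (by omega)]
        dsimp only
        by_cases hgv : g[(y+d.2).toNat][(x+d.1).toNat] = -1
        case pos =>
          rw [if_pos hgv, if_pos hgv]
          exact ihds b x y count apple ans out ⟨hx0, hx4, hy0, hy4⟩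
        case neg =>
          rw [if_neg hgv, if_neg hgv, hrc1]
          dsimp only
          rw [hrc2]
          dsimp only
          rw [pvBlock_mark b g x y hx0 hy0 hyg']
          have hcongr : pvBlock ((x, y) :: b) g = pvBlock (PySem.Set.add b (x, y)) g := by
            apply pvBlock_congr
            intro p
            simp only [List.mem_cons, PySem.Set.mem_add]
            tauto
          rw [hcongr]
          have happ : apple + (if g[(y+d.2).toNat][(x+d.1).toNat] = 1 then (1:Int) else 0)
              = if g[(y+d.2).toNat][(x+d.1).toNat] = 1 then apple + 1 else apple := by
            split <;> ring
          rw [happ]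
          rw [IH (PySem.Set.add b (x, y)) (x + d.1) (y + d.2) (ans ++ out) (count + 1)
            (if g[(y+d.2).toNat][(x+d.1).toNat] = 1 then apple + 1 else apple)
            ⟨by omega, by omega, by omega, by omega⟩]
          cases hrec : collectB g fuel (x + d.1) (y + d.2) (count + 1)
            (if g[(y+d.2).toNat][(x+d.1).toNat] = 1 then apple + 1 else apple)
            (PySem.Set.add b (x, y)) with
          | none =>
            simp only [Option.map_none]
            rw [foldlA_none, foldlB_none]
            rfl
          | some l =>
            simp only [Option.map_some]
            rw [← hcongr, pvBlock_restore b g x y hx0 hy0 hyg' hxg', List.append_assoc]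
            exact ihds b x y count apple ans (out ++ l) ⟨hx0, hx4, hy0, hy4⟩

theorem sim (fuel : Nat) :
    ∀ (g : List (List Int)) (b : List (Int × Int)) (x y : Int) (ans : List Int) (count apple : Int),
    pvGrid g → pvInB x y →
    dfsA fuel (pvBlock b g) x y ans count apple
      = (collectB g fuel x y count apple b).map (fun l => (pvBlock b g, ans ++ l)) := by
  induction fuel with
  | zero => intro g b x y ans count apple hg hin; rfl
  | succ fuel IH =>
    intro g b x y ans count apple hg hin
    show pvDirs.foldl (stepA (dfsA fuel) x y count apple)
        (some (pvBlock b g, if apple = 3 then ans ++ [count] else ans))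
      = (pvDirs.foldl (stepB (collectB g fuel) g x y count apple b)
          (some (if apple = 3 then [count] else []))).map (fun l => (pvBlock b g, ans ++ l))
    have hinit : (if apple = 3 then ans ++ [count] else ans)
        = ans ++ (if apple = 3 then [count] else []) := by split <;> simp
    rw [hinit]
    exact simLoop g fuel (fun b x y ans count apple hin => IH g b x y ans count apple hg hin) hg
      pvDirs b x y count apple ans (if apple = 3 then [count] else []) hin

-- ===== VERDICT (by name: the statement is the Claim_ definition above) =====
theorem dfs_spec : Claim_equal_dfs := by
  intro graph x y answer count apple hdom hpre
  unfold Spec_dfs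
  rcases hpre with ⟨hlen, hrows, hx0, hx4, hy0, hy4⟩ | ⟨hfar1, hfar2⟩
  · have hsim := sim 100 graph [] x y answer count apple ⟨hlen, hrows⟩ ⟨hx0, hx4, hy0, hy4⟩
    rw [pvBlock_nil] at hsim
    unfold dfs dfs_alt
    have hempty : (PySem.Set.empty : PySem.Set (Int × Int)) = [] := rfl
    rw [hempty, hsim]
    cases hc : collectB graph 100 x y count apple [] with
    | none => simp
    | some l => simp
  · have hd : ∀ d ∈ pvDirs, x + d.1 < 0 ∨ x + d.1 > 4 ∨ y + d.2 < 0 ∨ y + d.2 > 4 := by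
      intro d hd
      fin_cases hd <;> dsimp only <;> omega
    unfold dfs dfs_alt
    have e1 : dfsA 100 graph x y answer count apple
        = some (graph, if apple = 3 then answer ++ [count] else answer) := by
      show pvDirs.foldl (stepA (dfsA 99) x y count apple)
          (some (graph, if apple = 3 then answer ++ [count] else answer)) = _
      exact foldlA_skip _ _ _ _ _ _ _ hd
    have e2 : collectB graph 100 x y count apple PySem.Set.empty
        = some (if apple = 3 then [count] else []) := by
      show pvDirs.foldl (stepB (collectB graph 99) graph x y count apple PySem.Set.empty)
          (some (if apple = 3 then [count] else [])) = _
      exact foldlB_skip _ _ _ _ _ _ _ _ _ hd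
    rw [e1, e2]
    by_cases hap : apple = 3 <;> simp [hap]
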